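-- pv_equiv track=rewrite | github.com/cfhamlet/os-aio-pod | src/os_aio_pod/utils.py | parse_beans_arguments
-- ===== SOURCE A (Python) =====
-- def escape_split(sep, argstr):
--     """
--     Allows for escaping of the separator: e.g. task:arg='foo\, bar'
--
--     It should be noted that the way bash et. al. do command line parsing, those
--     single quotes are required.
--
--     Copy from fabric 1.14
--     """
--     escaped_sep = r"\%s" % sep
--
--     if escaped_sep not in argstr:
--         return argstr.split(sep)
--
--     before, _, after = argstr.partition(escaped_sep)
--     startlist = before.split(sep)  # a regular split is fine here
--     unfinished = startlist[-1]
--     startlist = startlist[:-1]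
--
--     # recurse because there may be more escaped separators
--     endlist = escape_split(sep, after)
--
--     # finish building the escaped value. we use endlist[0] becaue the first
--     # part of the string sent in recursion is the rest of the escaped value.
--     unfinished += sep + endlist[0]
--
--     return startlist + [unfinished] + endlist[1:]  # put together all the parts
--
-- def parse_beans_arguments(arguments):
--     """
--     Parse string list into list of tuples: command, args, kwargs, hosts, roles.
--
--     See sites/docs/usage/fab.rst, section on "per-task arguments" for details.
--     """
--     beans = []
--     for cmd in arguments:
--         bean = {"core": cmd}
--         if ":" in cmd:
--             cmd, argstr = cmd.split(":", 1)
--             bean["core"] = cmd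
--             for pair in escape_split(",", argstr):
--                 result = escape_split("=", pair)
--                 if len(result) > 1:
--                     k, v = result
--                     if k not in {"core"}:
--                         bean[k] = v
--         beans.append(bean)
--     return beans
-- ===== SOURCE B (Python) =====
-- def _escape_split(sep, argstr):
--     # single linear scan: '\'+sep -> literal sep; bare sep -> token boundary
--     tokens, buf, i, n = [], [], 0, len(argstr)
--     while i < n:
--         c = argstr[i]
--         if c == "\\" and i + 1 < n and argstr[i + 1] == sep:
--             buf.append(sep)
--             i += 2
--         elif c == sep:
--             tokens.append("".join(buf))
--             buf = []
--             i += 1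
--         else:
--             buf.append(c)
--             i += 1
--     tokens.append("".join(buf))
--     return tokens
--
--
-- def parse_beans_arguments(arguments):
--     beans = []
--     for cmd in arguments:
--         core, colon, argstr = cmd.partition(":")
--         bean = {"core": core}
--         if colon:
--             for pair in _escape_split(",", argstr):
--                 kv = _escape_split("=", pair)
--                 if len(kv) == 2 and kv[0] != "core":
--                     bean[kv[0]] = kv[1]
--         beans.append(bean)
--     return beans
-- ===== Notes on version B (the rewrite author's own statement) =====
-- stated objective: simpler
-- what changed: escape_split's recursive partition-and-reassemble (find the escaped separator, split the prefix, recurse on the suffix, stitch the boundary token back together) is replaced by a single left-to-right scan with a current-token buffer; the outer per-command code uses str.partition instead of 'in' + split(maxsplit=1).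
-- outside the precondition, e.g. on parse_beans_arguments(['a:b=c=d']): A raises ValueError, B returns [{'core': 'a'}]
import Mathlib
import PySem

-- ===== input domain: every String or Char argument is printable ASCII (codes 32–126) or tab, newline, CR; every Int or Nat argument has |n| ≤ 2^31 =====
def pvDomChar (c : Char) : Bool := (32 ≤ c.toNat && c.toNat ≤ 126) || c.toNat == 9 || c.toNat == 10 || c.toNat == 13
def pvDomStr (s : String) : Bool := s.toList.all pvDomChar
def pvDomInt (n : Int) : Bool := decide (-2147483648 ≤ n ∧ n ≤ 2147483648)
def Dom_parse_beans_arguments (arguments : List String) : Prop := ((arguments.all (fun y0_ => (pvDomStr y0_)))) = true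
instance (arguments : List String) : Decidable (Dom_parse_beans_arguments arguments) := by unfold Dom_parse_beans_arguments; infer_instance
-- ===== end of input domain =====

-- B replaces A's recursive partition-based escape_split with a single linear scan (simpler, one pass);
-- return values are identical on Pre_ (Pre_ only excludes inputs where A raises ValueError).

-- ===== PORT A =====

-- prepend a char to the first token of a token list (the cons case of str.split)
def consHead (a : Char) : List (List Char) → List (List Char)
  | [] => [[a]]
  | t :: ts => (a :: t) :: ts

-- s.split(sep) for a single-char sep, exact Python semantics ("".split(sep) == [""])
def pySplit (sep : Char) : List Char → List (List Char)
  | [] => [[]]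
  | c :: cs => if c = sep then [] :: pySplit sep cs else consHead c (pySplit sep cs)

-- first occurrence of the 2-char pattern ['\\', sep]: argstr.partition(escaped_sep) fused with
-- the 'escaped_sep not in argstr' test of A (none = pattern absent); exact for this 2-char pattern
def findEsc (sep : Char) : List Char → Option (List Char × List Char)
  | [] => none
  | a :: rest =>
      if a = '\\' ∧ rest.head? = some sep then some ([], rest.tail)
      else (findEsc sep rest).map (fun p => (a :: p.1, p.2))

theorem findEsc_some_length {sep : Char} : ∀ {s p q : List Char}, findEsc sep s = some (p, q) → q.length < s.length := by
  intro s
  induction s with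
  | nil => intro p q h; simp [findEsc] at h
  | cons a rest ih =>
      intro p q h
      by_cases hc : a = '\\' ∧ rest.head? = some sep
      · rw [findEsc, if_pos hc] at h
        simp only [Option.some.injEq, Prod.mk.injEq] at h
        obtain ⟨-, rfl⟩ := h
        cases rest with
        | nil => simp
        | cons b bs => simp
      · rw [findEsc, if_neg hc] at h
        cases hf : findEsc sep rest with
        | none => rw [hf] at h; simp at h
        | some pq =>
            obtain ⟨p1, p2⟩ := pq
            rw [hf] at h
            simp only [Option.map_some, Option.some.injEq, Prod.mk.injEq] at h
            obtain ⟨-, rfl⟩ := h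
            have := ih hf
            simp only [List.length_cons]
            omega

-- escape_split, the recursive fabric implementation (port of A's helper)
def escape_splitA (sep : Char) (s : List Char) : List (List Char) :=
  match h : findEsc sep s with
  | none => pySplit sep s
  | some (before, after) =>
      let startlist := pySplit sep before
      let unfinished := startlist.getLastD []
      let startlist' := startlist.dropLast
      let endlist := escape_splitA sep after
      startlist' ++ [unfinished ++ sep :: endlist.headD []] ++ endlist.tail
termination_by s.length
decreasing_by exact findEsc_some_length h

-- cmd.split(":", 1) when ':' is known to occur: (part before, part after) the first ':'
def splitOnce (c : Char) : List Char → List Char × List Char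
  | [] => ([], [])
  | a :: rest => if a = c then ([], rest)
                 else ((a :: (splitOnce c rest).1), (splitOnce c rest).2)

def parse_beans_arguments (arguments : List String) : List (List (String × String)) :=
  arguments.foldl (fun beans cmd =>
    beans ++ [(
      let bean : PySem.Dict String String := (PySem.Dict.empty).insert "core" cmd
      let bean :=
        if cmd.toList.contains ':' then
          let pr := splitOnce ':' cmd.toList
          let bean := bean.insert "core" (String.ofList pr.1)
          (escape_splitA ',' pr.2).foldl (fun bean pair =>
            let result := escape_splitA '=' pair
            if result.length > 1 then
              match result with
              | [k, v] => if String.ofList k ∉ (["core"] : List String)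
                          then bean.insert (String.ofList k) (String.ofList v) else bean
              | _ => bean  -- unreachable inside Pre_: Python raises ValueError unpacking 'k, v = result'
            else bean) bean
        else bean
      bean.items)]) []

-- ===== PORT B =====

-- B's escape_split: one linear scan with a current-token buffer (i+1 lookahead = two-char match)
def escape_splitB (sep : Char) (buf : List Char) : List Char → List (List Char)
  | [] => [buf]
  | [a] => if a = sep then [buf, []] else [buf ++ [a]]
  | a :: b :: rest =>
      if a = '\\' ∧ b = sep then escape_splitB sep (buf ++ [sep]) rest
      else if a = sep then buf :: escape_splitB sep [] (b :: rest)
      else escape_splitB sep (buf ++ [a]) (b :: rest)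

-- cmd.partition(":") : (before, separator found?, after)
def pyPartition (c : Char) : List Char → List Char × Bool × List Char
  | [] => ([], false, [])
  | a :: rest => if a = c then ([], true, rest)
                 else ((a :: (pyPartition c rest).1), (pyPartition c rest).2)

def parse_one_alt (cmd : String) : List (String × String) :=
  let p := pyPartition ':' cmd.toList
  let bean : PySem.Dict String String := (PySem.Dict.empty).insert "core" (String.ofList p.1)
  let bean :=
    if p.2.1 then
      (escape_splitB ',' [] p.2.2).foldl (fun bean pair =>
        let kv := escape_splitB '=' [] pair
        if kv.length = 2 ∧ String.ofList (PySem.List.pyGetD kv 0 []) ≠ "core" then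
          bean.insert (String.ofList (PySem.List.pyGetD kv 0 [])) (String.ofList (PySem.List.pyGetD kv 1 []))
        else bean) bean
    else bean
  bean.items

def parse_beans_arguments_alt (arguments : List String) : List (List (String × String)) :=
  arguments.map parse_one_alt

-- ===== PRECONDITION & SPEC =====

-- independent single-pass tokenizer (character automaton; `pending` = an unconsumed backslash),
-- used only to STATE Pre_/Raises_ without referring to either port
def pvEscTok (sep : Char) (pending : Bool) (buf : List Char) : List Char → List (List Char)
  | [] => if pending then [buf ++ ['\\']] else [buf]
  | c :: cs =>
      if pending then
        if c = sep then pvEscTok sep false (buf ++ [sep]) cs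
        else if c = '\\' then pvEscTok sep true (buf ++ ['\\']) cs
        else pvEscTok sep false (buf ++ ['\\', c]) cs
      else
        if c = '\\' then pvEscTok sep true buf cs
        else if c = sep then buf :: pvEscTok sep false [] cs
        else pvEscTok sep false (buf ++ [c]) cs

-- Pre_ excludes exactly the inputs on which A RAISES ValueError ('k, v = result' with 3+ fields):
-- some argument has, after its first ':', a comma-field containing 2 or more unescaped '='.
def Pre_parse_beans_arguments (arguments : List String) : Prop :=
  ∀ cmd ∈ arguments, ':' ∈ cmd.toList →
    ∀ t ∈ pvEscTok ',' false [] ((cmd.toList.dropWhile (· ≠ ':')).tail),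
      (pvEscTok '=' false [] t).length ≤ 2
instance (arguments : List String) : Decidable (Pre_parse_beans_arguments arguments) := by
  unfold Pre_parse_beans_arguments; infer_instance

def pvWitness_parse_beans_arguments : List String := ["serve:host=local\\,host,port=80", "stop"]

def Spec_parse_beans_arguments (arguments : List String) (out : List (List (String × String))) : Prop := out = parse_beans_arguments_alt arguments
instance (arguments : List String) (out : List (List (String × String))) : Decidable (Spec_parse_beans_arguments arguments out) := by unfold Spec_parse_beans_arguments; infer_instance

-- ===== CLAIM (what is proved, stated in full; the proofs are below) =====
def Claim_equal_parse_beans_arguments : Prop := ∀ (arguments : List String), Dom_parse_beans_arguments arguments → Pre_parse_beans_arguments arguments → Spec_parse_beans_arguments arguments (parse_beans_arguments arguments)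

-- ===== LEMMAS AND PROOFS =====

-- prepend a buffer to the first token (proof helper)
def prependFirst (buf : List Char) : List (List Char) → List (List Char)
  | [] => [buf]
  | t :: ts => (buf ++ t) :: ts

theorem pySplit_ne_nil (sep : Char) (s : List Char) : pySplit sep s ≠ [] := by
  cases s with
  | nil => simp [pySplit]
  | cons c cs =>
      simp only [pySplit]
      split
      · simp
      · cases h : pySplit sep cs <;> simp [consHead]

theorem escA_of_none (sep : Char) (s : List Char) (h : findEsc sep s = none) :
    escape_splitA sep s = pySplit sep s := by
  rw [escape_splitA.eq_def]
  split
  · rfl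
  · rename_i heq; rw [h] at heq; cases heq

theorem escA_of_some (sep : Char) (s before after : List Char) (h : findEsc sep s = some (before, after)) :
    escape_splitA sep s =
      (pySplit sep before).dropLast ++
        [((pySplit sep before).getLastD []) ++ sep :: (escape_splitA sep after).headD []] ++
        (escape_splitA sep after).tail := by
  rw [escape_splitA.eq_def]
  split
  · rename_i heq; rw [h] at heq; cases heq
  · rename_i b a heq
    rw [h] at heq
    simp only [Option.some.injEq, Prod.mk.injEq] at heq
    obtain ⟨rfl, rfl⟩ := heq
    rfl

theorem escA_ne_nil (sep : Char) (s : List Char) : escape_splitA sep s ≠ [] := by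
  cases hf : findEsc sep s with
  | none => rw [escA_of_none sep s hf]; exact pySplit_ne_nil sep s
  | some pq => rw [escA_of_some sep s pq.1 pq.2 (by rw [hf])]; simp

theorem findEsc_cons (sep a : Char) (s : List Char) (h : ¬(a = '\\' ∧ s.head? = some sep)) :
    findEsc sep (a :: s) = (findEsc sep s).map (fun p => (a :: p.1, p.2)) := by
  rw [findEsc, if_neg h]

theorem escA_esc (sep : Char) (s' : List Char) :
    escape_splitA sep ('\\' :: sep :: s') =
      (sep :: (escape_splitA sep s').headD []) :: (escape_splitA sep s').tail := by
  have hf : findEsc sep ('\\' :: sep :: s') = some ([], s') := by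
    rw [findEsc, if_pos (by simp)]
    rfl
  rw [escA_of_some sep _ [] s' hf]
  simp [pySplit]

theorem escA_cons_sep (sep : Char) (s : List Char) (h : ¬(sep = '\\' ∧ s.head? = some sep)) :
    escape_splitA sep (sep :: s) = [] :: escape_splitA sep s := by
  cases hf : findEsc sep s with
  | none =>
      have hc : findEsc sep (sep :: s) = none := by rw [findEsc_cons sep sep s h, hf]; rfl
      rw [escA_of_none sep _ hc, escA_of_none sep s hf]
      simp [pySplit]
  | some pq =>
      obtain ⟨p, q⟩ := pq
      have hc : findEsc sep (sep :: s) = some (sep :: p, q) := by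
        rw [findEsc_cons sep sep s h, hf]; rfl
      rw [escA_of_some sep _ _ _ hc, escA_of_some sep s p q hf]
      cases hL : pySplit sep p with
      | nil => exact absurd hL (pySplit_ne_nil sep p)
      | cons u us =>
          rw [show pySplit sep (sep :: p) = [] :: pySplit sep p from by simp [pySplit], hL]
          cases us <;> simp [List.getLastD_cons]

theorem escA_cons (sep a : Char) (s : List Char)
    (ha : ¬(a = '\\' ∧ s.head? = some sep)) (hs : a ≠ sep) :
    escape_splitA sep (a :: s) = consHead a (escape_splitA sep s) := by
  cases hf : findEsc sep s with
  | none =>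
      have hc : findEsc sep (a :: s) = none := by rw [findEsc_cons sep a s ha, hf]; rfl
      rw [escA_of_none sep _ hc, escA_of_none sep s hf]
      simp [pySplit, hs]
  | some pq =>
      obtain ⟨p, q⟩ := pq
      have hc : findEsc sep (a :: s) = some (a :: p, q) := by
        rw [findEsc_cons sep a s ha, hf]; rfl
      rw [escA_of_some sep _ _ _ hc, escA_of_some sep s p q hf]
      rw [show pySplit sep (a :: p) = consHead a (pySplit sep p) from by simp [pySplit, hs]]
      cases hL : pySplit sep p with
      | nil => exact absurd hL (pySplit_ne_nil sep p)
      | cons u us =>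
          cases us <;> simp [consHead, List.getLastD_cons]

theorem prependFirst_nil (l : List (List Char)) (h : l ≠ []) : prependFirst [] l = l := by
  cases l with
  | nil => exact absurd rfl h
  | cons t ts => simp [prependFirst]

theorem escB_eq_prepend (sep : Char) :
    ∀ (n : Nat) (s : List Char), s.length ≤ n → ∀ buf,
      escape_splitB sep buf s = prependFirst buf (escape_splitA sep s) := by
  intro n
  induction n with
  | zero =>
      intro s hs buf
      have : s = [] := List.length_eq_zero_iff.mp (Nat.le_zero.mp hs)
      subst this
      rw [escA_of_none sep [] rfl]
      simp [escape_splitB, pySplit, prependFirst]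
  | succ n ih =>
      intro s hs buf
      obtain _ | ⟨a, _ | ⟨b, rest⟩⟩ := s
      · rw [escA_of_none sep [] rfl]
        simp [escape_splitB, pySplit, prependFirst]
      · have hf : findEsc sep [a] = none := by
          rw [findEsc_cons sep a [] (by simp)]; rfl
        rw [escA_of_none sep [a] hf]
        by_cases has : a = sep <;>
          simp [escape_splitB, pySplit, consHead, prependFirst, has]
      · by_cases h1 : a = '\\' ∧ b = sep
        · obtain ⟨ha, hb⟩ := h1
          rw [show escape_splitB sep buf (a :: b :: rest) = escape_splitB sep (buf ++ [sep]) rest from by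
            simp [escape_splitB, ha, hb]]
          rw [ih rest (by simp at hs; omega) (buf ++ [sep])]
          rw [ha, hb, escA_esc sep rest]
          cases hE : escape_splitA sep rest with
          | nil => exact absurd hE (escA_ne_nil sep rest)
          | cons h t => simp [prependFirst]
        · by_cases h2 : a = sep
          · rw [show escape_splitB sep buf (a :: b :: rest) = buf :: escape_splitB sep [] (b :: rest) from by
              simp [escape_splitB, h2]
              rintro h3 h4
              exact absurd ⟨h2.trans h3, h4⟩ h1]
            rw [ih (b :: rest) (by simp at hs ⊢; omega) []]
            rw [h2, escA_cons_sep sep (b :: rest) (by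
              rintro ⟨hsep, hb⟩
              exact h1 ⟨h2.trans hsep, by simpa using hb⟩)]
            rw [prependFirst_nil _ (escA_ne_nil sep (b :: rest))]
            simp [prependFirst]
          · rw [show escape_splitB sep buf (a :: b :: rest) = escape_splitB sep (buf ++ [a]) (b :: rest) from by
              simp [escape_splitB, h1, h2]]
            rw [ih (b :: rest) (by simp at hs ⊢; omega) (buf ++ [a])]
            rw [escA_cons sep a (b :: rest) (by
              rintro ⟨ha, hb⟩
              exact h1 ⟨ha, by simpa using hb⟩) h2]
            cases hE : escape_splitA sep (b :: rest) with
            | nil => exact absurd hE (escA_ne_nil sep (b :: rest))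
            | cons h t => simp [prependFirst, consHead]

theorem escB_eq_escA (sep : Char) (s : List Char) :
    escape_splitB sep [] s = escape_splitA sep s := by
  rw [escB_eq_prepend sep s.length s le_rfl []]
  exact prependFirst_nil _ (escA_ne_nil sep s)

theorem pvEscTok_eq_escB (sep : Char) (hsep : sep ≠ '\\') :
    ∀ (s : List Char) (pending : Bool) (buf : List Char),
      pvEscTok sep pending buf s = escape_splitB sep buf (if pending then '\\' :: s else s) := by
  intro s
  induction s with
  | nil =>
      intro pending buf
      cases pending <;> simp [pvEscTok, escape_splitB, Ne.symm hsep]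
  | cons c cs ih =>
      intro pending buf
      cases pending with
      | false =>
          by_cases hc1 : c = '\\'
          · rw [show pvEscTok sep false buf (c :: cs) = pvEscTok sep true buf cs from by
              simp [pvEscTok, hc1, Ne.symm hsep]]
            rw [ih true buf]
            rw [hc1]
            simp
          · by_cases hc2 : c = sep
            · rw [show pvEscTok sep false buf (c :: cs) = buf :: pvEscTok sep false [] cs from by
                simp [pvEscTok, hc1, hc2, hsep, Ne.symm hsep]]
              rw [ih false []]
              cases cs with
              | nil => simp [escape_splitB, hc2, hsep, Ne.symm hsep]
              | cons d ds => simp [escape_splitB, hc1, hc2, hsep, Ne.symm hsep]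
            · rw [show pvEscTok sep false buf (c :: cs) = pvEscTok sep false (buf ++ [c]) cs from by
                simp [pvEscTok, hc1, hc2]]
              rw [ih false (buf ++ [c])]
              cases cs with
              | nil => simp [escape_splitB, hc2]
              | cons d ds => simp [escape_splitB, hc1, hc2, hsep, Ne.symm hsep]
      | true =>
          by_cases hc2 : c = sep
          · rw [show pvEscTok sep true buf (c :: cs) = pvEscTok sep false (buf ++ [c]) cs from by
              simp [pvEscTok, hc2, hsep, Ne.symm hsep]]
            rw [ih false (buf ++ [c])]
            simp [escape_splitB, hc2, hsep, Ne.symm hsep]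
          · by_cases hc1 : c = '\\'
            · rw [show pvEscTok sep true buf (c :: cs) = pvEscTok sep true (buf ++ ['\\']) cs from by
                simp [pvEscTok, hc1, hc2, hsep, Ne.symm hsep]]
              rw [ih true (buf ++ ['\\'])]
              rw [hc1]
              simp [escape_splitB, hc2, Ne.symm hsep]
            · rw [show pvEscTok sep true buf (c :: cs) = pvEscTok sep false (buf ++ ['\\', c]) cs from by
                simp [pvEscTok, hc1, hc2]]
              rw [ih false (buf ++ ['\\', c])]
              cases cs with
              | nil => simp [escape_splitB, hc1, hc2, Ne.symm hsep]
              | cons d ds => simp [escape_splitB, hc1, hc2, Ne.symm hsep]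

theorem pvEscTok_eq_escA (sep : Char) (hsep : sep ≠ '\\') (s : List Char) :
    pvEscTok sep false [] s = escape_splitA sep s := by
  rw [pvEscTok_eq_escB sep hsep s false []]
  exact escB_eq_escA sep s

theorem part_not_found (c : Char) (s : List Char) (h : s.contains c = false) :
    pyPartition c s = (s, false, []) := by
  induction s with
  | nil => rfl
  | cons a rest ih =>
      by_cases hac : a = c
      · subst hac; simp at h
      · have hr : rest.contains c = false := by
          simp only [List.contains_cons, Bool.or_eq_false_iff] at h
          exact h.2
        simp [pyPartition, hac, ih hr]

theorem part_found (c : Char) (s : List Char) (h : s.contains c = true) :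
    pyPartition c s = ((splitOnce c s).1, true, (splitOnce c s).2) := by
  induction s with
  | nil => simp at h
  | cons a rest ih =>
      by_cases hac : a = c
      · simp [pyPartition, splitOnce, hac]
      · have hr : rest.contains c = true := by
          simp only [List.contains_cons] at h
          rcases Bool.or_eq_true_iff.mp h with h1 | h2
          · simp at h1
            first
              | exact absurd h1 hac
              | exact absurd h1.symm hac
          · exact h2
        simp [pyPartition, splitOnce, hac, ih hr]

theorem splitOnce_snd (c : Char) (s : List Char) (h : c ∈ s) :
    (splitOnce c s).2 = (s.dropWhile (· ≠ c)).tail := by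
  induction s with
  | nil => simp at h
  | cons a rest ih =>
      by_cases hac : a = c
      · simp [splitOnce, List.dropWhile, hac]
      · have hr : c ∈ rest := by
          rcases List.mem_cons.mp h with h1 | h2
          · exact absurd h1.symm hac
          · exact h2
        simp [splitOnce, List.dropWhile, hac, ih hr]

-- A's per-command body, named (proof helper; definitionally the body of parse_beans_arguments' fold)
def pvAOne (cmd : String) : List (String × String) :=
  let bean : PySem.Dict String String := (PySem.Dict.empty).insert "core" cmd
  let bean :=
    if cmd.toList.contains ':' then
      let pr := splitOnce ':' cmd.toList
      let bean := bean.insert "core" (String.ofList pr.1)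
      (escape_splitA ',' pr.2).foldl (fun bean pair =>
        let result := escape_splitA '=' pair
        if result.length > 1 then
          match result with
          | [k, v] => if String.ofList k ∉ (["core"] : List String)
                      then bean.insert (String.ofList k) (String.ofList v) else bean
          | _ => bean
        else bean) bean
    else bean
  bean.items

theorem A_eq_map (arguments : List String) : parse_beans_arguments arguments = arguments.map pvAOne := by
  have h := PySem.List.foldl_append_singleton_eq_map pvAOne arguments []
  rw [List.nil_append] at h
  exact h

theorem percmd (cmd : String)
    (hpre : ':' ∈ cmd.toList →
      ∀ t ∈ pvEscTok ',' false [] ((cmd.toList.dropWhile (· ≠ ':')).tail),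
        (pvEscTok '=' false [] t).length ≤ 2) :
    pvAOne cmd = parse_one_alt cmd := by
  unfold pvAOne parse_one_alt
  by_cases hc : cmd.toList.contains ':' = true
  · have hmem : ':' ∈ cmd.toList := List.contains_iff_mem.mp hc
    rw [part_found ':' cmd.toList hc]
    simp only [hc, if_true, PySem.Dict.insert_insert_self, escB_eq_escA]
    congr 1
    apply PySem.List.foldl_congr_mem
    intro acc pair hpair
    have hlen : (escape_splitA '=' pair).length ≤ 2 := by
      have h' := hpre hmem pair (by
        rw [pvEscTok_eq_escA ',' (by decide), ← splitOnce_snd ':' cmd.toList hmem]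
        exact hpair)
      rwa [pvEscTok_eq_escA '=' (by decide)] at h'
    rcases hkv : escape_splitA '=' pair with _ | ⟨k, _ | ⟨v, _ | ⟨w, ws⟩⟩⟩
    · simp
    · simp
    · simp [PySem.List.pyGetD, PySem.List.pyGet?, PySem.List.pyIdx?]
    · rw [hkv] at hlen; simp at hlen
  · have hnmem : ':' ∉ cmd.toList := by simpa using hc
    rw [part_not_found ':' cmd.toList (by simpa using hc)]
    simp [hc, hnmem, String.ofList_toList]

-- ===== VERDICT (by name: the statement is the Claim_ definition above) =====
theorem parse_beans_arguments_spec : Claim_equal_parse_beans_arguments := by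
  intro arguments _hdom hpre
  unfold Spec_parse_beans_arguments
  rw [A_eq_map, parse_beans_arguments_alt]
  exact List.map_congr_left (fun cmd hmem => percmd cmd (hpre cmd hmem))
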